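-- pv_equiv track=rewrite | github.com/Sayeem2004/AdventOfCode | 2015/D16/2/2.py | solve
-- ===== SOURCE A (Python) =====
-- def solve(lines,dict):
--     points = {};
--     for i,line in enumerate(lines):
--         p = 0;
--         for l in line:
--             if (l[0] == "cats" or l[0] == "trees"):
--                 if (int(l[1]) > dict[l[0]]): p += 1;
--                 continue;
--             if (l[0] == "pomeranians" or l[0] == "goldfish"):
--                 if (int(l[1]) < dict[l[0]]): p += 1;
--                 continue;
--             if (int(l[1]) == dict[l[0]]): p += 1;
--         points[i+1] = p;
--     mx = 0;
--     for p in points: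
--         mx = max(points[p],mx);
--     for p in points:
--         if (points[p] == mx):
--             return p;
--     return 0;
-- ===== SOURCE B (Python) =====
-- _CMP = {
--     "cats": lambda n, t: n > t,
--     "trees": lambda n, t: n > t,
--     "pomeranians": lambda n, t: n < t,
--     "goldfish": lambda n, t: n < t,
-- }
--
-- def _eq(n, t):
--     return n == t
--
-- def solve(lines, dict):
--     scored = sorted(
--         (-sum(_CMP.get(l[0], _eq)(int(l[1]), dict[l[0]]) for l in line), i + 1)
--         for i, line in enumerate(lines)
--     )
--     return scored[0][1] if scored else 0
-- ===== Notes on version B (the rewrite author's own statement) =====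
-- stated objective: alternative
-- what changed: Replaces A's points dict plus two post-hoc scans (running max, then first-match scan) by decorate-sort-select: build (-score, 1-based index) pairs, sort them lexicographically, and return the head's index; the per-line if-chain becomes a comparator-table lookup summed over the line.
import Mathlib
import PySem

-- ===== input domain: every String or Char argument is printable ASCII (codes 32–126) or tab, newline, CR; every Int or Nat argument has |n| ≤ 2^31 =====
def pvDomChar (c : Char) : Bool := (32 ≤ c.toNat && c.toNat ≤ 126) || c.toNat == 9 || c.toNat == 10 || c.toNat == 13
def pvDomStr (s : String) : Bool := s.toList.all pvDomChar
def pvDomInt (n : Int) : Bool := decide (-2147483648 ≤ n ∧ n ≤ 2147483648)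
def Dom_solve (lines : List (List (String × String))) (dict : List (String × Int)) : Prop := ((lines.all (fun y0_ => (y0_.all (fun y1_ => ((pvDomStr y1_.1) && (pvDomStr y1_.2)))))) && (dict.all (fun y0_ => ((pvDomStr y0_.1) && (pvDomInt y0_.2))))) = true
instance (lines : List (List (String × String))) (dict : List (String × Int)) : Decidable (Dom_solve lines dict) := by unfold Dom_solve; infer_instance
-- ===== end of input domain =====

-- B replaces A's points dict and its two post-hoc scans by decorate-sort-select:
-- sort (-score, index) pairs lexicographically and return the head's index;
-- objective: alternative (same result, genuinely different mechanism, no speed claim).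

-- ===== PORT A =====
-- A's inner 'for l in line' loop (accumulator p, three-branch matching)
def lineScoreA (dict : List (String × Int)) (line : List (String × String)) : Int :=
  line.foldl (fun p l =>
    if l.1 == "cats" || l.1 == "trees" then
      if (PySem.Int.ofStr? l.2).getD 0 > (List.lookup l.1 dict).getD 0 then p + 1 else p
    else if l.1 == "pomeranians" || l.1 == "goldfish" then
      if (PySem.Int.ofStr? l.2).getD 0 < (List.lookup l.1 dict).getD 0 then p + 1 else p
    else
      if (PySem.Int.ofStr? l.2).getD 0 == (List.lookup l.1 dict).getD 0 then p + 1 else p) 0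

-- A's 'points' dict: points[i+1] = score of line i
def pointsA (dict : List (String × Int)) (lines : List (List (String × String))) : PySem.Dict Int Int :=
  (PySem.List.enumerate lines 0).foldl
    (fun d a => d.insert (a.1 + 1) (lineScoreA dict a.2)) PySem.Dict.empty

-- A's 'mx' loop over the keys of points
def mxA (points : PySem.Dict Int Int) : Int :=
  points.keys.foldl (fun mx p => max (points.getD p 0) mx) 0

def solve (lines : List (List (String × String))) (dict : List (String × Int)) : Int :=
  match (pointsA dict lines).keys.find?
      (fun p => (pointsA dict lines).getD p 0 == mxA (pointsA dict lines)) with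
  | some p => p
  | none => 0

-- ===== PORT B =====
-- B's module-level comparator table _CMP and default comparator _eq
def cmpTable : PySem.Dict String (Int → Int → Bool) :=
  PySem.Dict.mk [("cats", fun n t => decide (n > t)), ("trees", fun n t => decide (n > t)),
                 ("pomeranians", fun n t => decide (n < t)), ("goldfish", fun n t => decide (n < t))]

def eqB (n t : Int) : Bool := n == t

-- B's per-line score: sum of the 0/1 comparator results
def scoreB (dict : List (String × Int)) (line : List (String × String)) : Int :=
  (line.map (fun l =>
    if ((cmpTable.get? l.1).getD eqB) ((PySem.Int.ofStr? l.2).getD 0) ((List.lookup l.1 dict).getD 0)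
    then (1 : Int) else 0)).sum

def solve_alt (lines : List (List (String × String))) (dict : List (String × Int)) : Int :=
  match PySem.List.sorted2
      ((PySem.List.enumerate lines 0).map (fun a => (-(scoreB dict a.2), a.1 + 1)))
      Prod.fst Prod.snd false with
  | m :: _ => m.2
  | [] => 0

-- ===== PRECONDITION & SPEC =====
-- Pre_ excludes exactly the inputs where Python A raises: a value string int() rejects
-- (ValueError) or a key absent from dict (KeyError).
def Pre_solve (lines : List (List (String × String))) (dict : List (String × Int)) : Prop :=
  ∀ line ∈ lines, ∀ l ∈ line,
    (PySem.Int.ofStr? l.2).isSome = true ∧ (List.lookup l.1 dict).isSome = true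
instance (lines : List (List (String × String))) (dict : List (String × Int)) : Decidable (Pre_solve lines dict) := by unfold Pre_solve; infer_instance

def pvWitness_solve : (List (List (String × String))) × (List (String × Int)) :=
  ([[("cats", "3"), ("cars", "2")], [("trees", "1")]], [("cats", 2), ("cars", 2), ("trees", 3)])

def Spec_solve (lines : List (List (String × String))) (dict : List (String × Int)) (out : Int) : Prop := out = solve_alt lines dict
instance (lines : List (List (String × String))) (dict : List (String × Int)) (out : Int) : Decidable (Spec_solve lines dict out) := by unfold Spec_solve; infer_instance

-- ===== CLAIM (what is proved, stated in full; the proofs are below) =====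
def Claim_equal_solve : Prop := ∀ (lines : List (List (String × String))) (dict : List (String × Int)), Dom_solve lines dict → Pre_solve lines dict → Spec_solve lines dict (solve lines dict)

-- ===== LEMMAS AND PROOFS =====

-- B's per-element predicate (comparator-table result)
def predB (dict : List (String × Int)) (l : String × String) : Bool :=
  ((cmpTable.get? l.1).getD eqB) ((PySem.Int.ofStr? l.2).getD 0) ((List.lookup l.1 dict).getD 0)

theorem getD_cmpTable (k : String) :
    (cmpTable.get? k).getD eqB =
      if k == "cats" || k == "trees" then fun n t => decide (n > t)
      else if k == "pomeranians" || k == "goldfish" then fun n t => decide (n < t)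
      else eqB := by
  have e : ∀ (a : String), ¬ k = a → (a == k) = false :=
    fun a h => beq_eq_false_iff_ne.mpr (fun hc => h hc.symm)
  have e' : ∀ (a : String), ¬ k = a → (k == a) = false :=
    fun a h => beq_eq_false_iff_ne.mpr h
  by_cases h1 : k = "cats"
  · subst h1; rfl
  by_cases h2 : k = "trees"
  · subst h2; rfl
  by_cases h3 : k = "pomeranians"
  · subst h3; rfl
  by_cases h4 : k = "goldfish"
  · subst h4; rfl
  simp only [cmpTable, PySem.Dict.get?, List.find?,
    e _ h1, e _ h2, e _ h3, e _ h4, e' _ h1, e' _ h2, e' _ h3, e' _ h4,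
    Bool.or_self]
  rfl

theorem stepA_eq (dict : List (String × Int)) (p : Int) (l : String × String) :
    (if l.1 == "cats" || l.1 == "trees" then
      if (PySem.Int.ofStr? l.2).getD 0 > (List.lookup l.1 dict).getD 0 then p + 1 else p
    else if l.1 == "pomeranians" || l.1 == "goldfish" then
      if (PySem.Int.ofStr? l.2).getD 0 < (List.lookup l.1 dict).getD 0 then p + 1 else p
    else
      if (PySem.Int.ofStr? l.2).getD 0 == (List.lookup l.1 dict).getD 0 then p + 1 else p)
    = if predB dict l then p + 1 else p := by
  unfold predB
  rw [getD_cmpTable]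
  unfold eqB
  split_ifs <;> simp_all <;> omega

-- A's inner loop counts exactly the elements B's comparator accepts
theorem lineScoreA_eq (dict : List (String × Int)) (line : List (String × String)) :
    lineScoreA dict line = (line.countP (predB dict) : Nat) := by
  unfold lineScoreA
  rw [PySem.List.foldl_congr_mem line _ (fun p l => if predB dict l then p + 1 else p) 0
      (fun acc x _ => stepA_eq dict acc x)]
  rw [PySem.List.foldl_count_if]
  ring

-- B's 0/1 sum is the same count
theorem scoreB_eq (dict : List (String × Int)) (line : List (String × String)) :
    scoreB dict line = (line.countP (predB dict) : Nat) := by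
  unfold scoreB
  exact PySem.List.sum_map_ite_one_zero (predB dict) line

-- the (1-based index, score) pair list both programs effectively traverse
def qsOf (dict : List (String × Int)) (lines : List (List (String × String))) : List (Int × Int) :=
  (PySem.List.enumerate lines 0).map (fun a => (a.1 + 1, (a.2.countP (predB dict) : Nat)))

def aMx (qs : List (Int × Int)) : Int := qs.foldl (fun m q => max q.2 m) 0

def aRes (qs : List (Int × Int)) : Int :=
  match qs.find? (fun q => q.2 == aMx qs) with
  | some q => q.1
  | none => 0

theorem aMx_bound : ∀ (qs : List (Int × Int)) (i : Int),
    i ≤ qs.foldl (fun m q => max q.2 m) i ∧ ∀ q ∈ qs, q.2 ≤ qs.foldl (fun m q => max q.2 m) i := by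
  intro qs
  induction qs with
  | nil => intro i; simp
  | cons x xs ih =>
    intro i
    obtain ⟨h1, h2⟩ := ih (max x.2 i)
    refine ⟨le_trans (le_max_right _ _) h1, ?_⟩
    intro q hq
    rcases List.mem_cons.mp hq with rfl | hq
    · exact le_trans (le_max_left _ _) h1
    · exact h2 _ hq

theorem aMx_mem : ∀ (qs : List (Int × Int)) (i : Int),
    qs.foldl (fun m q => max q.2 m) i = i ∨ ∃ q ∈ qs, qs.foldl (fun m q => max q.2 m) i = q.2 := by
  intro qs
  induction qs with
  | nil => intro i; left; rfl
  | cons x xs ih =>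
    intro i
    rcases ih (max x.2 i) with h | ⟨q, hq, he⟩
    · simp only [List.foldl_cons, h]
      rcases max_choice x.2 i with h2 | h2
      · right; exact ⟨x, List.mem_cons_self, h2⟩
      · left; exact h2
    · right; exact ⟨q, List.mem_cons_of_mem _ hq, by simpa using he⟩

-- the maximum is attained on a nonempty list of nonnegative scores
theorem aMx_attained (qs : List (Int × Int)) (hne : qs ≠ []) (hnn : ∀ q ∈ qs, 0 ≤ q.2) :
    ∃ q ∈ qs, q.2 = aMx qs := by
  rcases aMx_mem qs 0 with h | ⟨q, hq, he⟩
  · rcases qs with _ | ⟨x, xs⟩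
    · exact absurd rfl hne
    · refine ⟨x, List.mem_cons_self, ?_⟩
      have hx := (aMx_bound (x :: xs) 0).2 x List.mem_cons_self
      have hx0 := hnn x List.mem_cons_self
      unfold aMx; omega
  · exact ⟨q, hq, he.symm⟩

-- find? through .map (·.1), given a pointwise-agreeing predicate
theorem find?_map_fst (qs : List (Int × Int)) (pr : Int → Bool) (pr' : Int × Int → Bool)
    (h : ∀ q ∈ qs, pr q.1 = pr' q) :
    (qs.map (·.1)).find? pr = (qs.find? pr').map (·.1) := by
  induction qs with
  | nil => rfl
  | cons x xs ih =>
    simp only [List.map_cons, List.find?_cons]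
    rw [h x List.mem_cons_self]
    cases hx : pr' x with
    | false => exact ih (fun q hq => h q (List.mem_cons_of_mem _ hq))
    | true => rfl

theorem nodup_fst_enum (lines : List (List (String × String))) :
    ((PySem.List.enumerate lines 0).map (fun (a : Int × List (String × String)) => a.1 + 1)).Nodup := by
  have h : (PySem.List.enumerate lines 0).map (fun (a : Int × List (String × String)) => a.1 + 1)
      = ((PySem.List.enumerate lines 0).map (·.1)).map (· + 1) := by
    rw [List.map_map]; rfl
  rw [h, PySem.List.map_fst_enumerate]
  exact (PySem.List.nodup_pyRange_one 0 _).map (fun a b => by omega)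

-- the points dict A builds is exactly qsOf, as a literal dict
theorem pointsA_eq (dict : List (String × Int)) (lines : List (List (String × String))) :
    pointsA dict lines = PySem.Dict.mk (qsOf dict lines) := by
  apply PySem.Dict.ext
  unfold pointsA
  rw [PySem.Dict.items_foldl_insert_fresh (PySem.List.enumerate lines 0)
      (fun a => a.1 + 1) (fun a => lineScoreA dict a.2) PySem.Dict.empty
      (fun a _ => PySem.Dict.contains_empty _) (nodup_fst_enum lines)]
  have hemp : (PySem.Dict.empty : PySem.Dict Int Int).items = [] := rfl
  rw [hemp, List.nil_append]
  show _ = qsOf dict lines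
  unfold qsOf
  apply List.map_congr_left
  intro a _
  rw [lineScoreA_eq]

theorem nodup_keys_qs (dict : List (String × Int)) (lines : List (List (String × String))) :
    ((qsOf dict lines).map (·.1)).Nodup := by
  unfold qsOf
  rw [List.map_map]
  exact nodup_fst_enum lines

theorem solveA_eq (lines : List (List (String × String))) (dict : List (String × Int)) :
    solve lines dict = aRes (qsOf dict lines) := by
  unfold solve
  rw [pointsA_eq]
  have hget : ∀ q ∈ qsOf dict lines, (PySem.Dict.mk (qsOf dict lines)).getD q.1 0 = q.2 := by
    intro q hq
    exact PySem.Dict.getD_of_mem_items _ hq (nodup_keys_qs dict lines) 0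
  have hkeys : (PySem.Dict.mk (qsOf dict lines)).keys = (qsOf dict lines).map (·.1) := rfl
  have hmx : mxA (PySem.Dict.mk (qsOf dict lines)) = aMx (qsOf dict lines) := by
    unfold mxA aMx
    rw [hkeys, List.foldl_map]
    exact PySem.List.foldl_congr_mem _ _ _ 0 (fun acc x hx => by rw [hget x hx])
  rw [hmx, hkeys,
    find?_map_fst (qsOf dict lines) _ (fun q => q.2 == aMx (qsOf dict lines))
      (fun q hq => by rw [hget q hq])]
  unfold aRes
  cases (qsOf dict lines).find? (fun q => q.2 == aMx (qsOf dict lines)) <;> rfl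

-- ---- B side: the lexicographic sort and its head ----

-- the strict lexicographic 'before' test sorted2 uses for k1 = fst, k2 = snd
def bef (a b : Int × Int) : Bool :=
  decide (a.1 < b.1) || !decide (b.1 < a.1) && decide (a.2 < b.2)

-- 'a comes no later than b' in the sorted order
def R (a b : Int × Int) : Prop := a.1 < b.1 ∨ (a.1 = b.1 ∧ a.2 ≤ b.2)

theorem bef_false_iff (a b : Int × Int) : bef b a = false ↔ R a b := by
  unfold bef R
  simp only [Bool.or_eq_false_iff, Bool.and_eq_false_iff, Bool.not_eq_false',
    decide_eq_false_iff_not, decide_eq_true_eq, not_lt]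
  omega

theorem bef_true_R (a b : Int × Int) (h : bef a b = true) : R a b := by
  unfold bef at h
  unfold R
  simp only [Bool.or_eq_true, Bool.and_eq_true, Bool.not_eq_true',
    decide_eq_true_eq, decide_eq_false_iff_not, not_lt] at h
  omega

theorem R_trans (a b c : Int × Int) (h1 : R a b) (h2 : R b c) : R a c := by
  unfold R at *; omega

theorem R_refl (a : Int × Int) : R a a := by unfold R; omega

theorem pairwise_insertBy (x : Int × Int) :
    ∀ (acc : List (Int × Int)), acc.Pairwise R →
      (PySem.List.insertBy bef x acc).Pairwise R := by
  intro acc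
  induction acc with
  | nil => intro _; simp [PySem.List.insertBy]
  | cons y ys ih =>
    intro h
    rw [List.pairwise_cons] at h
    obtain ⟨hy, hys⟩ := h
    show (if bef x y then x :: y :: ys else y :: PySem.List.insertBy bef x ys).Pairwise R
    split_ifs with hb
    · have hxy := bef_true_R x y hb
      refine List.Pairwise.cons ?_ (List.Pairwise.cons hy hys)
      intro z hz
      rcases List.mem_cons.mp hz with rfl | hz
      · exact hxy
      · exact R_trans x y z hxy (hy z hz)
    · refine List.Pairwise.cons ?_ (ih hys)
      intro z hz
      rcases (PySem.List.mem_insertBy bef x z ys).mp hz with h | hz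
      · exact (bef_false_iff y z).mp (by rw [h]; exact Bool.eq_false_iff.mpr hb)
      · exact hy z hz

theorem sorted2_eq (qs : List (Int × Int)) :
    PySem.List.sorted2 qs Prod.fst Prod.snd false
      = qs.foldl (fun acc x => PySem.List.insertBy bef x acc) [] := rfl

theorem pairwise_sorted2 (qs : List (Int × Int)) :
    (PySem.List.sorted2 qs Prod.fst Prod.snd false).Pairwise R := by
  rw [sorted2_eq]
  suffices h : ∀ (acc : List (Int × Int)), acc.Pairwise R →
      (qs.foldl (fun acc x => PySem.List.insertBy bef x acc) acc).Pairwise R from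
    h [] (List.Pairwise.nil)
  induction qs with
  | nil => intro acc h; exact h
  | cons x xs ih =>
    intro acc h
    exact ih _ (pairwise_insertBy x acc h)

-- the head of the sort is R-below every element of the input list
theorem head_sorted2_min (qs : List (Int × Int)) (m : Int × Int) (t : List (Int × Int))
    (h : PySem.List.sorted2 qs Prod.fst Prod.snd false = m :: t) :
    ∀ y ∈ qs, R m y := by
  intro y hy
  have hperm := PySem.List.sorted2_perm qs Prod.fst Prod.snd false
  rw [h] at hperm
  have hy' : y ∈ m :: t := hperm.mem_iff.mpr hy
  have hp := pairwise_sorted2 qs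
  rw [h, List.pairwise_cons] at hp
  rcases List.mem_cons.mp hy' with rfl | hy'
  · exact R_refl y
  · exact hp.1 y hy'

-- B computes the head of the sort of the negated-score decoration of qsOf
theorem solveB_eq (lines : List (List (String × String))) (dict : List (String × Int)) :
    solve_alt lines dict =
      match PySem.List.sorted2 ((qsOf dict lines).map (fun q => (-q.2, q.1)))
          Prod.fst Prod.snd false with
      | m :: _ => m.2
      | [] => 0 := by
  unfold solve_alt qsOf
  rw [List.map_map]
  have h : ((fun q : Int × Int => (-q.2, q.1)) ∘
        (fun a : Int × List (String × String) => (a.1 + 1, ((a.2.countP (predB dict) : Nat) : Int))))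
      = fun a : Int × List (String × String) => (-(scoreB dict a.2), a.1 + 1) := by
    funext a
    simp [Function.comp, scoreB_eq]
  rw [h]

-- qsOf's indices are strictly increasing along the list
theorem idx_strict_mono (dict : List (String × Int)) (lines : List (List (String × String))) :
    (qsOf dict lines).Pairwise (fun a b => a.1 < b.1) := by
  have h : ((qsOf dict lines).map (·.1)).Pairwise (· < ·) := by
    unfold qsOf
    rw [List.map_map]
    have he : ((fun (q : Int × Int) => q.1) ∘
        (fun a : Int × List (String × String) => (a.1 + 1, ((a.2.countP (predB dict) : Nat) : Int))))
        = (fun a : Int × List (String × String) => a.1 + 1) := rfl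
    rw [he]
    have h2 : (fun a : Int × List (String × String) => a.1 + 1)
        = (fun i : Int => i + 1) ∘ (fun a : Int × List (String × String) => a.1) := rfl
    rw [h2, ← List.map_map, PySem.List.map_fst_enumerate]
    have h3 : PySem.List.pyRange 0 (0 + (lines.length : Int)) = PySem.List.pyRange 0 (lines.length : Nat) := by
      norm_num
    rw [h3, PySem.List.pyRange_zero_natCast, List.map_map]
    refine (List.pairwise_lt_range).map _ ?_
    intro a b hab
    simp only [Function.comp]
    omega
  rw [List.pairwise_map] at h
  exact h

-- a list element R-below all max-score elements is what find? returns
theorem aRes_of_min (qs : List (Int × Int)) (hpw : qs.Pairwise (fun a b => a.1 < b.1))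
    (q : Int × Int) (hq : q ∈ qs) (hmx : q.2 = aMx qs)
    (hmin : ∀ y ∈ qs, R (-q.2, q.1) (-y.2, y.1)) :
    aRes qs = q.1 := by
  unfold aRes
  have hsome : (qs.find? (fun y => y.2 == aMx qs)).isSome = true := by
    rw [List.find?_isSome]
    exact ⟨q, hq, by simp [hmx]⟩
  obtain ⟨q', hq'⟩ := Option.isSome_iff_exists.mp hsome
  rw [hq']
  have hq'mx : q'.2 = aMx qs := by
    have := List.find?_some hq'
    simpa using this
  obtain ⟨as, bs, hsplit, hbefore⟩ := List.find?_eq_some_iff_append.mp hq' |>.2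
  -- q is not in as (elements before q' all fail the predicate)
  have hqnotas : q ∉ as := by
    intro hc
    have := hbefore q hc
    simp [hmx] at this
  have hqin : q ∈ q' :: bs := by
    rw [hsplit] at hq
    rcases List.mem_append.mp hq with h | h
    · exact absurd h hqnotas
    · exact h
  rcases List.mem_cons.mp hqin with rfl | hqbs
  · rfl
  · -- q strictly after q' in the list, so q'.1 < q.1; but R gives q.1 ≤ q'.1
    have hlt : q'.1 < q.1 := by
      rw [hsplit] at hpw
      have := (List.pairwise_append.mp hpw).2.1
      rw [List.pairwise_cons] at this
      exact this.1 q hqbs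
    have hR := hmin q' (by rw [hsplit]; exact List.mem_append.mpr (Or.inr List.mem_cons_self))
    unfold R at hR
    simp only at hR
    omega

-- ===== VERDICT (by name: the statement is the Claim_ definition above) =====
theorem solve_spec : Claim_equal_solve := by
  unfold Claim_equal_solve Spec_solve
  intro lines dict _ _
  rw [solveA_eq, solveB_eq]
  set qs := qsOf dict lines with hqs
  have hnn : ∀ q ∈ qs, 0 ≤ q.2 := by
    intro q hq
    rw [hqs] at hq
    obtain ⟨a, _, rfl⟩ := List.mem_map.mp hq
    exact Int.natCast_nonneg _
  cases hs : PySem.List.sorted2 (qs.map (fun q => (-q.2, q.1))) Prod.fst Prod.snd false with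
  | nil =>
    have hperm := PySem.List.sorted2_perm (qs.map (fun q => (-q.2, q.1))) Prod.fst Prod.snd false
    rw [hs] at hperm
    have : qs.map (fun q : Int × Int => (-q.2, q.1)) = [] := hperm.symm.eq_nil
    have hqe : qs = [] := List.map_eq_nil_iff.mp this
    rw [hqe]
    rfl
  | cons m t =>
    have hmin := head_sorted2_min _ m t hs
    have hm : m ∈ qs.map (fun q : Int × Int => (-q.2, q.1)) := by
      have hperm := PySem.List.sorted2_perm (qs.map (fun q => (-q.2, q.1))) Prod.fst Prod.snd false
      rw [hs] at hperm
      exact hperm.mem_iff.mp List.mem_cons_self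
    obtain ⟨q, hq, hqm⟩ := List.mem_map.mp hm
    have hne : qs ≠ [] := by
      intro hc; rw [hc] at hq; exact absurd hq (List.not_mem_nil)
    -- q attains the maximum
    obtain ⟨r, hr, hrmx⟩ := aMx_attained qs hne hnn
    have hminq : ∀ y ∈ qs, R (-q.2, q.1) (-y.2, y.1) := by
      intro y hy
      rw [hqm]
      exact hmin _ (List.mem_map.mpr ⟨y, hy, rfl⟩)
    have hqge : aMx qs ≤ q.2 := by
      have := hminq r hr
      unfold R at this
      simp only at this
      omega
    have hqle : q.2 ≤ aMx qs := (aMx_bound qs 0).2 q hq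
    have hqmx : q.2 = aMx qs := le_antisymm hqle hqge
    rw [aRes_of_min qs (idx_strict_mono dict lines) q hq hqmx hminq]
    rw [← hqm]
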